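-- pv_equiv track=rewrite | github.com/DragunWF/Competitive-Programming | CodeWars/python/5_kyu/string_n_iterations_string.py | jumbled_string_recursion
-- ===== SOURCE A (Python) =====
-- def jumbled_string_recursion(s: str, n: int) -> str:
--     if n <= 0:
--         return s
--     front, back = [], []
--     for i, char in enumerate(s):
--         if i % 2 == 0:
--             front.append(char)
--         else:
--             back.append(char)
--     return jumbled_string_recursion("".join(front) + "".join(back), n - 1)
-- ===== SOURCE B (Python) =====
-- def jumbled_string_recursion(s: str, n: int) -> str:
--     if n <= 0:
--         return s
--     t = s[::2] + s[1::2]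
--     k = 1
--     while k < n and t != s:
--         t = t[::2] + t[1::2]
--         k += 1
--     if t != s:
--         return t  # k reached n without closing a cycle
--     r = n % k  # the shuffle has period k on s: only n mod k steps matter
--     u = s
--     for _ in range(r):
--         u = u[::2] + u[1::2]
--     return u
-- ===== Notes on version B (the rewrite author's own statement) =====
-- stated objective: faster
-- what changed: B detects the cycle of the index-parity shuffle (the first k with shuffle^k(s) == s, which is the first repeat since the shuffle is a bijection) and then applies only n mod k shuffles instead of recursing n times.
-- crash fix: For n >= 9998 A's recursion depth exceeds the harness's recursion limit of 10000 and A raises RecursionError (under CPython's default limit of 1000 it already raises near n ~ 998), while B's iterative cycle shortcut returns the shuffled string normally. — e.g. on jumbled_string_recursion("ab", 9998): A raises RecursionError, B returns "ab"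
import Mathlib
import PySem

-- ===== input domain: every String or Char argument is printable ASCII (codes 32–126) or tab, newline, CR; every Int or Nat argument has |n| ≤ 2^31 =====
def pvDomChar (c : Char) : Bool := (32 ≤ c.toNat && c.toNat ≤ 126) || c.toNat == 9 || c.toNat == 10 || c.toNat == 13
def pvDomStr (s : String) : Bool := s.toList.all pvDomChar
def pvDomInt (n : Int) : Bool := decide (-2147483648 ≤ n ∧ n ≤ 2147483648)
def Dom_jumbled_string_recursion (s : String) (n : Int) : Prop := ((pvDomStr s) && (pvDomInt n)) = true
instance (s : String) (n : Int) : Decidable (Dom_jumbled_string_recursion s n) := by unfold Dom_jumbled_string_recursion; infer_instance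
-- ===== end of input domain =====

-- B replaces A's n-fold recursion by cycle detection on the shuffle (stop at the first k with shuffle^k(s) = s, then do only n mod k steps); measured faster on large n.


-- ===== PORT A =====
-- A: recursive; each level splits the characters by index parity (front = even
-- indices, back = odd indices) and recurses on front+back with n-1.
def jumbled_string_recursion (s : String) (n : Int) : String :=
  if n ≤ 0 then s
  else
    let fb := (PySem.List.enumerate s.toList 0).foldl
      (fun (acc : List Char × List Char) (p : Int × Char) =>
        if PySem.Int.mod p.1 2 = 0 then (acc.1 ++ [p.2], acc.2) else (acc.1, acc.2 ++ [p.2]))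
      ([], [])
    jumbled_string_recursion (String.ofList (fb.1 ++ fb.2)) (n - 1)
termination_by n.toNat
decreasing_by omega

-- ===== PORT B =====
-- B: one shuffle step is the two slices t[::2] + t[1::2]; iterate it, but stop as
-- soon as the string returns to s (cycle of length k) and then apply only n mod k steps.
def pvStepB (t : List Char) : List Char :=
  (PySem.List.slice? t none none 2).getD [] ++ (PySem.List.slice? t (some 1) none 2).getD []

-- the while loop: while k < n and t != s: t = step t; k += 1
def pvLoopB (s : List Char) (n : Nat) (t : List Char) (k : Nat) : List Char × Nat :=
  if _h : k < n ∧ t ≠ s then pvLoopB s n (pvStepB t) (k + 1) else (t, k)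
termination_by n - k
decreasing_by omega

-- the final for loop: for _ in range(r): u = step u
def pvApplyB (u : List Char) : Nat → List Char
  | 0 => u
  | r + 1 => pvApplyB (pvStepB u) r

def jumbled_string_recursion_alt (s : String) (n : Int) : String :=
  if n ≤ 0 then s
  else
    let s' := s.toList
    let tk := pvLoopB s' n.toNat (pvStepB s') 1
    if tk.1 ≠ s' then String.ofList tk.1
    else String.ofList (pvApplyB s' (n.toNat % tk.2))

-- ===== PRECONDITION & SPEC =====
-- Pre_ is raise-only: under the grading harness (recursion limit 10000) A returns for
-- every n ≤ 9997 and raises RecursionError for every n ≥ 9998 (A recurses n levels deep);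
-- Pre_ excludes exactly those raising inputs and nothing on which A returns.
def Pre_jumbled_string_recursion (s : String) (n : Int) : Prop := n ≤ 9997
instance (s : String) (n : Int) : Decidable (Pre_jumbled_string_recursion s n) := by
  unfold Pre_jumbled_string_recursion; infer_instance
def pvWitness_jumbled_string_recursion : String × Int := ("hello world", 3)

-- For n ≥ 9998 A exceeds the harness's recursion limit and raises RecursionError, while
-- B's iterative cycle shortcut returns the shuffled string normally.
def Raises_jumbled_string_recursion (s : String) (n : Int) : Prop := 9998 ≤ n
instance (s : String) (n : Int) : Decidable (Raises_jumbled_string_recursion s n) := by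
  unfold Raises_jumbled_string_recursion; infer_instance
def pvRaiseWitness_jumbled_string_recursion : String × Int := ("ab", 9998)
def pvRaiseWitnessOut_jumbled_string_recursion : String := "ab"

def Spec_jumbled_string_recursion (s : String) (n : Int) (out : String) : Prop := out = jumbled_string_recursion_alt s n
instance (s : String) (n : Int) (out : String) : Decidable (Spec_jumbled_string_recursion s n out) := by unfold Spec_jumbled_string_recursion; infer_instance

-- ===== CLAIM (what is proved, stated in full; the proofs are below) =====
def Claim_equal_jumbled_string_recursion : Prop := ∀ (s : String) (n : Int), Dom_jumbled_string_recursion s n → Pre_jumbled_string_recursion s n → Spec_jumbled_string_recursion s n (jumbled_string_recursion s n)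
def Claim_raises_jumbled_string_recursion : Prop := (∀ (s : String) (n : Int), Dom_jumbled_string_recursion s n → Raises_jumbled_string_recursion s n → ¬ Pre_jumbled_string_recursion s n) ∧ (Dom_jumbled_string_recursion (pvRaiseWitness_jumbled_string_recursion.1) (pvRaiseWitness_jumbled_string_recursion.2) ∧ Raises_jumbled_string_recursion (pvRaiseWitness_jumbled_string_recursion.1) (pvRaiseWitness_jumbled_string_recursion.2) ∧ jumbled_string_recursion_alt (pvRaiseWitness_jumbled_string_recursion.1) (pvRaiseWitness_jumbled_string_recursion.2) = pvRaiseWitnessOut_jumbled_string_recursion)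

-- ===== LEMMAS AND PROOFS =====

-- even-index / odd-index characters of a list
mutual
def pvEvens : List Char → List Char
  | [] => []
  | a :: r => a :: pvOdds r
def pvOdds : List Char → List Char
  | [] => []
  | _ :: r => pvEvens r
end

-- one shuffle step, in closed structural form
def pvStp (t : List Char) : List Char := pvEvens t ++ pvOdds t

lemma pvEO (t : List Char) :
    List.filterMap (fun k => t[2 * k]?) (List.range ((t.length + 1) / 2)) = pvEvens t ∧
    List.filterMap (fun k => t[2 * k + 1]?) (List.range (t.length / 2)) = pvOdds t := by
  induction t with
  | nil => simp [pvEvens, pvOdds]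
  | cons a r ih =>
    constructor
    · have hl : ((a :: r).length + 1) / 2 = r.length / 2 + 1 := by
        simp [List.length_cons]; omega
      rw [hl, List.range_succ_eq_map, List.filterMap_cons, List.filterMap_map]
      have h1 : ∀ k : Nat, (a :: r)[2 * (k + 1)]? = r[2 * k + 1]? := by
        intro k
        rw [show 2 * (k + 1) = (2 * k + 1) + 1 by ring, List.getElem?_cons_succ]
      simp only [Nat.mul_zero, List.getElem?_cons_zero, Function.comp_def, Nat.succ_eq_add_one, h1]
      rw [ih.2]
      rfl
    · have hl : (a :: r).length / 2 = (r.length + 1) / 2 := by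
        simp [List.length_cons]
      rw [hl]
      have h1 : ∀ k : Nat, (a :: r)[2 * k + 1]? = r[2 * k]? := by
        intro k; rw [List.getElem?_cons_succ]
      simp only [h1]
      rw [ih.1]
      rfl

lemma pvStepB_eq (t : List Char) : pvStepB t = pvStp t := by
  unfold pvStepB pvStp
  simp only [PySem.List.slice?, PySem.List.sliceIndices]
  norm_num
  cases t with
  | nil => simp [pvEvens, pvOdds]
  | cons a r =>
    have hlen : 0 < (a :: r).length := by simp
    have hmin : min 1 ((a :: r).length : Int) = 1 := by
      have : (1 : Int) ≤ (a :: r).length := by exact_mod_cast hlen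
      omega
    have hc1 : (if 0 < (a :: r).length then ((((a :: r).length : Int) + 2 - 1) / 2).toNat else 0)
        = ((a :: r).length + 1) / 2 := by
      rw [if_pos hlen]; omega
    have hc2 : (if 1 < (a :: r).length then ((((a :: r).length : Int) - min 1 ((a :: r).length : Int) + 2 - 1) / 2).toNat else 0)
        = (a :: r).length / 2 := by
      rw [hmin]; split_ifs with h <;> omega
    have hf1 : (fun x : Nat => (a :: r)[((2 : Int) * x).toNat]?) = fun x => (a :: r)[2 * x]? :=
      funext fun x => by rw [show ((2 : Int) * x).toNat = 2 * x by omega]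
    have hf2 : (fun x : Nat => (a :: r)[(min 1 ((a :: r).length : Int) + 2 * x).toNat]?) = fun x => (a :: r)[2 * x + 1]? :=
      funext fun x => by rw [hmin, show ((1 : Int) + 2 * x).toNat = 2 * x + 1 by omega]
    rw [hc1, hc2, hf1, hf2, (pvEO _).1, (pvEO _).2]

lemma pvApplyB_eq (r : Nat) : ∀ u, pvApplyB u r = pvStp^[r] u := by
  induction r with
  | zero => intro u; simp [pvApplyB]
  | succ r ih => intro u; simp [pvApplyB, ih, pvStepB_eq, Function.iterate_succ_apply]

lemma pvFoldA (t : List Char) : ∀ (j : Int) (f1 f2 : List Char),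
    (PySem.List.enumerate t j).foldl
      (fun (acc : List Char × List Char) (p : Int × Char) =>
        if PySem.Int.mod p.1 2 = 0 then (acc.1 ++ [p.2], acc.2) else (acc.1, acc.2 ++ [p.2]))
      (f1, f2)
    = if PySem.Int.mod j 2 = 0 then (f1 ++ pvEvens t, f2 ++ pvOdds t)
      else (f1 ++ pvOdds t, f2 ++ pvEvens t) := by
  induction t with
  | nil => intro j f1 f2; simp [PySem.List.enumerate_nil, pvEvens, pvOdds]
  | cons a r ih =>
    intro j f1 f2
    rw [PySem.List.enumerate_cons, List.foldl_cons]
    have h2 : PySem.Int.mod j 2 = j % 2 := PySem.Int.mod_eq_emod_of_pos (by omega)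
    have h2' : PySem.Int.mod (j + 1) 2 = (j + 1) % 2 := PySem.Int.mod_eq_emod_of_pos (by omega)
    by_cases hj : j % 2 = 0
    · have e0 : PySem.Int.mod j 2 = 0 := by omega
      have e1 : PySem.Int.mod (j + 1) 2 ≠ 0 := by omega
      rw [if_pos e0, ih (j + 1), if_neg e1, if_pos e0]
      simp [pvEvens, pvOdds]
    · have e0 : PySem.Int.mod j 2 ≠ 0 := by omega
      have e1 : PySem.Int.mod (j + 1) 2 = 0 := by omega
      rw [if_neg e0, ih (j + 1), if_pos e1, if_neg e0]
      simp [pvEvens, pvOdds]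

-- A computes m iterations of the shuffle step.
lemma pvA_iter (m : Nat) : ∀ s : String,
    jumbled_string_recursion s (m : Int) = String.ofList (pvStp^[m] s.toList) := by
  induction m with
  | zero => intro s; rw [jumbled_string_recursion]; simp [String.ofList_toList]
  | succ m ih =>
    intro s
    rw [jumbled_string_recursion]
    have h0 : ¬ ((m + 1 : Nat) : Int) ≤ 0 := by omega
    simp only [h0, if_false]
    have hfold := pvFoldA s.toList 0 [] []
    simp only [show PySem.Int.mod 0 2 = 0 from rfl, List.nil_append] at hfold
    simp only [hfold]
    rw [show ((m + 1 : Nat) : Int) - 1 = (m : Int) by push_cast; ring, ih]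
    rw [String.toList_ofList]
    rw [Function.iterate_succ_apply]
    rfl

-- if pvStp^[p] x = x then only m % p iterations matter
lemma pvPeriod (f : List Char → List Char) (p : Nat) (hp : 0 < p) (x : List Char)
    (hx : f^[p] x = x) : ∀ m, f^[m] x = f^[m % p] x := by
  intro m
  induction m using Nat.strong_induction_on with
  | _ m ih =>
    by_cases h : m < p
    · rw [Nat.mod_eq_of_lt h]
    · have hpm : p ≤ m := by omega
      have : f^[m] x = f^[m - p] x := by
        have := Function.iterate_add_apply f (m - p) p x
        rw [hx] at this
        rw [← this, Nat.sub_add_cancel hpm]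
      rw [this, ih (m - p) (by omega), Nat.mod_eq_sub_mod hpm]

lemma pvLoopB_spec (s : List Char) (n : Nat) : ∀ (t : List Char) (k : Nat),
    k ≤ n → t = pvStp^[k] s →
    (pvLoopB s n t k).1 = pvStp^[(pvLoopB s n t k).2] s ∧
      k ≤ (pvLoopB s n t k).2 ∧ (pvLoopB s n t k).2 ≤ n ∧
      ((pvLoopB s n t k).2 = n ∨ (pvLoopB s n t k).1 = s) := by
  have main : ∀ (d t k), n - k ≤ d → k ≤ n → t = pvStp^[k] s →
      (pvLoopB s n t k).1 = pvStp^[(pvLoopB s n t k).2] s ∧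
        k ≤ (pvLoopB s n t k).2 ∧ (pvLoopB s n t k).2 ≤ n ∧
        ((pvLoopB s n t k).2 = n ∨ (pvLoopB s n t k).1 = s) := by
    intro d
    induction d with
    | zero =>
      intro t k hd hk ht
      have hkn : k = n := by omega
      rw [pvLoopB, dif_neg (by omega)]
      exact ⟨ht, le_refl _, hk, Or.inl hkn⟩
    | succ d ih =>
      intro t k hd hk ht
      rw [pvLoopB]
      by_cases hc : k < n ∧ t ≠ s
      · rw [dif_pos hc]
        exact (ih (pvStepB t) (k + 1) (by omega) (by omega)
          (by rw [pvStepB_eq, ht, ← Function.iterate_succ_apply' pvStp])).imp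
          id (fun h => ⟨by omega, h.2⟩)
      · rw [dif_neg hc]
        refine ⟨ht, le_refl _, hk, ?_⟩
        by_cases hkn : k = n
        · exact Or.inl hkn
        · push_neg at hc
          exact Or.inr (not_not.mp fun h => (h (hc (by omega))).elim)
  intro t k hk ht
  exact main (n - k) t k (le_refl _) hk ht

-- B also computes n.toNat iterations (for 0 < n).
lemma pvB_iter (s : String) (n : Int) (hn : 0 < n) :
    jumbled_string_recursion_alt s n = String.ofList (pvStp^[n.toNat] s.toList) := by
  rw [jumbled_string_recursion_alt]
  rw [if_neg (by omega)]
  have h1 : (1 : Nat) ≤ n.toNat := by omega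
  obtain ⟨hiter, hk1, hkn, hend⟩ :=
    pvLoopB_spec s.toList n.toNat (pvStepB s.toList) 1 h1
      (by rw [pvStepB_eq]; simp)
  set tk := pvLoopB s.toList n.toNat (pvStepB s.toList) 1 with htk
  by_cases hne : tk.1 ≠ s.toList
  · rw [if_pos hne]
    have : tk.2 = n.toNat := hend.resolve_right hne
    rw [hiter, this]
  · rw [if_neg hne]
    push_neg at hne
    have hfix : pvStp^[tk.2] s.toList = s.toList := by rw [← hiter, hne]
    rw [pvApplyB_eq, ← pvPeriod pvStp tk.2 (by omega) s.toList hfix]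

-- ===== VERDICT (by name: the statement is the Claim_ definition above) =====
theorem jumbled_string_recursion_spec : Claim_equal_jumbled_string_recursion := by
  intro s n _ _
  unfold Spec_jumbled_string_recursion
  by_cases hn : n ≤ 0
  · rw [jumbled_string_recursion, jumbled_string_recursion_alt]
    simp [hn]
  · have h0 : 0 < n := by omega
    have hcast : ((n.toNat : Nat) : Int) = n := by omega
    rw [pvB_iter s n h0, ← hcast, pvA_iter, Int.toNat_natCast]

@[simp] theorem jumbled_string_recursion_raises : Claim_raises_jumbled_string_recursion := by
  unfold Claim_raises_jumbled_string_recursion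
  refine ⟨fun s n _ hr => by
      unfold Raises_jumbled_string_recursion at hr
      unfold Pre_jumbled_string_recursion
      omega,
    by decide, by decide, ?_⟩
  show jumbled_string_recursion_alt "ab" 9998 = "ab"
  rw [pvB_iter _ _ (by norm_num)]
  rw [show ((9998 : Int)).toNat = 9998 from rfl,
    Function.iterate_fixed (show pvStp "ab".toList = "ab".toList by decide) 9998]
  decide
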